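-- pv_equiv track=rewrite | github.com/tokumaru-y/competitive_program_python | antBook/re_solve/200/50.py | calc_next
-- ===== SOURCE A (Python) =====
-- def calc_next(s):
--     n = len(s)
--     res = [[n] * 26 for _ in range(n+1)]
--     for i in range(n-1,-1,-1):
--         for j in range(26):
--             res[i][j] = res[i+1][j]
--         res[i][ord(s[i])-97] = i
--     return res
-- ===== SOURCE B (Python) =====
-- def calc_next(s):
--     n = len(s)
--     occ = [[] for _ in range(26)]
--     for i, c in enumerate(s):
--         occ[ord(c) - 97].append(i)
--     cols = []
--     for ps in occ:
--         col = []
--         prev = -1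
--         for p in ps:
--             col += [p] * (p - prev)
--             prev = p
--         col += [n] * (n - prev)
--         cols.append(col)
--     return [list(row) for row in zip(*cols)]
-- ===== Notes on version B (the rewrite author's own statement) =====
-- stated objective: alternative
-- what changed: B replaces A's backward row-copying DP (each row = copy of the next row with one entry overwritten) by bucketing each letter's occurrence positions in one forward pass, producing each of the 26 columns by run-length expansion of its occurrence list, and transposing the columns with zip(*cols).
import Mathlib
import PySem

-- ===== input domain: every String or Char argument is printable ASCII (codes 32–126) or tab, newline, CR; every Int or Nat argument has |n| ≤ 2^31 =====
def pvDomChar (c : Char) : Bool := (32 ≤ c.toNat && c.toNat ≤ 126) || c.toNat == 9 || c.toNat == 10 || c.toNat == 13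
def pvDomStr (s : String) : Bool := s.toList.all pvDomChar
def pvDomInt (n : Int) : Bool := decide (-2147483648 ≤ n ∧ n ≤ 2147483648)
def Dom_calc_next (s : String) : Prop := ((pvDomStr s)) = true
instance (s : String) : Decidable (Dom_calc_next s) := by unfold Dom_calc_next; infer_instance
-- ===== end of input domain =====

-- B builds the table by a different algorithm: one forward pass buckets the positions of each
-- letter, each of the 26 columns is then produced by run-length expansion of its occurrence
-- list, and the rows are obtained by transposing the columns (zip(*cols)) — no backward DP
-- recurrence over rows. Alternative decomposition, same asymptotic cost.


-- ===== PORT A =====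
-- literal port of A's loop body for one i of range(n-1,-1,-1): the inner j-loop copies row i+1
-- into row i entry by entry; then res[i][ord(s[i])-97] = i (Python item assignment: pySetD —
-- a negative index wraps; the IndexError inputs are excluded by Pre_).
-- s[i] with 0 ≤ i < n is always in range, so cs.getD is exact there.
def pvBodyA (cs : List Char) (res : List (List Int)) (i : Int) : List (List Int) :=
  let it := i.toNat
  let res := (List.range 26).foldl
    (fun r (j : Nat) => r.set it ((r.getD it []).set j ((r.getD (it + 1) []).getD j 0))) res
  res.set it (PySem.List.pySetD (res.getD it []) (((cs.getD it ' ').toNat : Int) - 97) i)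

def calc_next (s : String) : List (List Int) :=
  let cs := s.toList
  let n := cs.length
  let init := List.replicate (n + 1) (List.replicate 26 (n : Int))
  (PySem.List.pyRange ((n : Int) - 1) (-1) (-1)).foldl (pvBodyA cs) init

-- ===== PORT B =====
-- occ[ord(c)-97].append(i): read/write of occ at a possibly negative (wrapping) index —
-- pyGetD/pySetD are exact there; the IndexError inputs are excluded by Pre_.
def pvOccStep (occ : List (List Int)) (p : Int × Char) : List (List Int) :=
  PySem.List.pySetD occ ((p.2.toNat : Int) - 97)
    ((PySem.List.pyGetD occ ((p.2.toNat : Int) - 97) []) ++ [p.1])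

-- one column: run-length expansion of an occurrence list ps ('col += [p]*(p-prev); prev = p')
def pvColOf (n : Nat) (ps : List Int) : List Int :=
  let st := ps.foldl
    (fun (q : List Int × Int) p => (q.1 ++ List.replicate (p - q.2).toNat p, p)) ([], -1)
  st.1 ++ List.replicate (((n : Int)) - st.2).toNat (n : Int)

-- hand port of zip(*cols), exact: zip stops as soon as some column is exhausted; the fuel is
-- the first column's length, which bounds the number of steps (the first column loses one
-- element per step). '[list(row) for row in zip(*cols)]' is the identity on our List rows.
def pvZipStar : Nat → List (List Int) → List (List Int)
  | 0, _ => []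
  | fuel + 1, cols =>
    if cols.all (fun c => !c.isEmpty)
    then cols.map (fun c => c.headD 0) :: pvZipStar fuel (cols.map (fun c => c.tail))
    else []

def calc_next_alt (s : String) : List (List Int) :=
  let cs := s.toList
  let n := cs.length
  let occ := (PySem.List.enumerate cs).foldl pvOccStep (List.replicate 26 ([] : List Int))
  let cols := occ.map (pvColOf n)
  pvZipStar ((cols.headD []).length) cols

-- ===== PRECONDITION & SPEC =====
-- A raises IndexError exactly when some character has code < 71 or > 122 (the row index
-- ord(c)-97 is then outside Python's negative-index range for a 26-entry row); Pre_ excludes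
-- exactly those raising inputs and nothing else — on every input A returns on, A = B.
def Pre_calc_next (s : String) : Prop :=
  (s.toList.all (fun c => 71 ≤ c.toNat && c.toNat ≤ 122)) = true
instance (s : String) : Decidable (Pre_calc_next s) := by unfold Pre_calc_next; infer_instance
def pvWitness_calc_next : String := "cabca"

def Spec_calc_next (s : String) (out : List (List Int)) : Prop := out = calc_next_alt s
instance (s : String) (out : List (List Int)) : Decidable (Spec_calc_next s out) := by
  unfold Spec_calc_next; infer_instance

-- ===== CLAIM (what is proved, stated in full; the proofs are below) =====
def Claim_equal_calc_next : Prop :=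
  ∀ (s : String), Dom_calc_next s → Pre_calc_next s → Spec_calc_next s (calc_next s)

-- ===== LEMMAS AND PROOFS =====

-- effective column index of a character c with 71 ≤ code ≤ 122: ord(c)-97, wrapped mod the
-- 26-entry row exactly as Python's negative indexing wraps it
def pvEff (c : Char) : Nat := if 97 ≤ c.toNat then c.toNat - 97 else c.toNat - 71

-- pySetD / pyGetD at index ord(c)-97 of a 26-entry list hit position pvEff c
theorem pv_pySetD_eff {α : Type} (xs : List α) (c : Char) (v : α)
    (h71 : 71 ≤ c.toNat) (_h122 : c.toNat ≤ 122) (hlen : xs.length = 26) :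
    PySem.List.pySetD xs ((c.toNat : Int) - 97) v = xs.set (pvEff c) v := by
  unfold pvEff
  by_cases h : 97 ≤ c.toNat
  · rw [if_pos h]
    have h1 : ((c.toNat : Int) - 97) = ((c.toNat - 97 : Nat) : Int) := by omega
    rw [h1, PySem.List.pySetD_natCast]
  · rw [if_neg h]
    simp only [PySem.List.pySetD, PySem.List.pySet?, PySem.List.pyIdx?]
    rw [if_neg (by omega), if_pos (by rw [hlen]; omega)]
    have h2 : xs.length - (-((c.toNat : Int) - 97)).toNat = c.toNat - 71 := by
      rw [hlen]; omega
    rw [h2]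
    simp

theorem pv_pyGetD_eff {α : Type} (xs : List α) (c : Char) (d : α)
    (h71 : 71 ≤ c.toNat) (_h122 : c.toNat ≤ 122) (hlen : xs.length = 26) :
    PySem.List.pyGetD xs ((c.toNat : Int) - 97) d = xs.getD (pvEff c) d := by
  unfold pvEff
  by_cases h : 97 ≤ c.toNat
  · rw [if_pos h]
    have h1 : ((c.toNat : Int) - 97) = ((c.toNat - 97 : Nat) : Int) := by omega
    rw [h1, PySem.List.pyGetD_natCast]
  · rw [if_neg h]
    simp only [PySem.List.pyGetD, PySem.List.pyGet?, PySem.List.pyIdx?]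
    rw [if_neg (by omega), if_pos (by rw [hlen]; omega)]
    have h2 : xs.length - (-((c.toNat : Int) - 97)).toNat = c.toNat - 71 := by
      rw [hlen]; omega
    rw [h2]
    simp [List.getD_eq_getElem?_getD]

theorem pv_eff_lt (c : Char) (h122 : c.toNat ≤ 122) : pvEff c < 26 := by
  unfold pvEff; split_ifs <;> omega

-- pvN cs j i = least k with i ≤ k < n and pvEff cs[k] = j, else n: the intended table entry
-- (structural fuel recursion so that `decide` can evaluate it).
def pvNGo (cs : List Char) (j : Nat) : Nat → Nat → Int
  | _, 0 => (cs.length : Int)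
  | i, fuel + 1 =>
    if h : i < cs.length then
      (if pvEff (cs[i]'h) = j then (i : Int) else pvNGo cs j (i + 1) fuel)
    else (cs.length : Int)

def pvN (cs : List Char) (j i : Nat) : Int := pvNGo cs j i (cs.length - i)

theorem pvN_len (cs : List Char) (j : Nat) : pvN cs j cs.length = (cs.length : Int) := by
  simp [pvN, pvNGo]

theorem pvN_step (cs : List Char) (j : Nat) (i : Nat) (h : i < cs.length) :
    pvN cs j i = if pvEff (cs[i]'h) = j then (i : Int) else pvN cs j (i + 1) := by
  unfold pvN
  have h1 : cs.length - i = (cs.length - (i + 1)) + 1 := by omega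
  rw [h1]
  simp only [pvNGo, dif_pos h]

def pvTbl (cs : List Char) : List (List Int) :=
  (List.range (cs.length + 1)).map (fun i => (List.range 26).map (fun j => pvN cs j i))

theorem pv_getD_set_self {α : Type} (l : List α) (i : Nat) (x d : α) (h : i < l.length) :
    (l.set i x).getD i d = x := by
  simp [List.getD_eq_getElem?_getD, h]

theorem pv_getD_set_ne {α : Type} (l : List α) {i k : Nat} (x : α) (d : α) (h : k ≠ i) :
    (l.set i x).getD k d = l.getD k d := by
  simp [List.getD_eq_getElem?_getD, List.getElem?_set_ne (Ne.symm h)]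

-- copying loop on a single row
theorem pv_rowCopy (src : List Int) : ∀ (m : Nat) (dst : List Int), m ≤ dst.length →
    m ≤ src.length →
    (List.range m).foldl (fun d j => d.set j (src.getD j 0)) dst
      = src.take m ++ dst.drop m := by
  intro m
  induction m with
  | zero => intro dst _ _; simp
  | succ m ih =>
    intro dst h1 h2
    rw [List.range_succ, List.foldl_append, ih dst (by omega) (by omega)]
    simp only [List.foldl_cons, List.foldl_nil]
    have hm : m < src.length := by omega
    have hmd : m < dst.length := by omega
    have hgd : src.getD m 0 = src[m] := List.getD_eq_getElem src 0 hm
    rw [hgd, List.drop_eq_getElem_cons hmd, List.set_append]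
    have hlt : (src.take m).length = m := by simp; omega
    rw [hlt, if_neg (by omega), Nat.sub_self, List.set_cons_zero, List.take_add_one,
      List.getElem?_eq_getElem hm, Option.toList_some, List.append_assoc,
      List.singleton_append]

-- the table-level copy loop reduces to one row replacement
theorem pv_tableCopy (r : List (List Int)) (it : Nat) (h : it < r.length) (m : Nat) :
    (List.range m).foldl
      (fun r' (j : Nat) => r'.set it ((r'.getD it []).set j ((r'.getD (it + 1) []).getD j 0))) r
    = r.set it ((List.range m).foldl
        (fun d j => d.set j ((r.getD (it + 1) []).getD j 0)) (r.getD it [])) := by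
  induction m with
  | zero =>
    simp only [List.range_zero, List.foldl_nil]
    rw [List.getD_eq_getElem r [] h, List.set_getElem_self]
  | succ m ih =>
    rw [List.range_succ, List.foldl_append, List.foldl_append, ih]
    simp only [List.foldl_cons, List.foldl_nil]
    rw [pv_getD_set_self _ _ _ _ h, pv_getD_set_ne _ _ _ (by omega), List.set_set]

-- partially built table of A after positions ≥ m are processed
def pvTblFrom (cs : List Char) (m : Nat) : List (List Int) :=
  (List.range (cs.length + 1)).map
    (fun i => if i < m then List.replicate 26 (cs.length : Int)
              else (List.range 26).map (fun j => pvN cs j i))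

theorem pv_tblFrom_row (cs : List Char) (m i : Nat) (h : i < cs.length + 1) :
    (pvTblFrom cs m).getD i []
      = if i < m then List.replicate 26 (cs.length : Int)
        else (List.range 26).map (fun j => pvN cs j i) := by
  rw [List.getD_eq_getElem _ _ (by simp [pvTblFrom]; omega)]
  simp [pvTblFrom]

theorem pv_rowA (cs : List Char) (i : Nat) (hi : i < cs.length) :
    ((List.range 26).map (fun j => pvN cs j (i + 1))).set (pvEff (cs[i]'hi)) (i : Int)
      = (List.range 26).map (fun j => pvN cs j i) := by
  apply List.ext_getElem
  · simp
  · intro k hk hk'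
    simp only [List.getElem_set, List.getElem_map, List.getElem_range]
    rw [pvN_step cs k i hi]

theorem pv_tblSetA (cs : List Char) (i : Nat) (_hi : i < cs.length) :
    (pvTblFrom cs (i + 1)).set i ((List.range 26).map (fun j => pvN cs j i))
      = pvTblFrom cs i := by
  apply List.ext_getElem
  · simp [pvTblFrom]
  · intro k hk hk'
    simp only [List.getElem_set, pvTblFrom, List.getElem_map, List.getElem_range]
    by_cases hik : i = k
    · subst hik
      rw [if_pos rfl, if_neg (by omega)]
    · rw [if_neg hik]
      by_cases hlt : k < i
      · rw [if_pos (by omega), if_pos hlt]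
      · rw [if_neg (by omega), if_neg hlt]

theorem pv_stepA (cs : List Char) (hpre : ∀ c ∈ cs, 71 ≤ c.toNat ∧ c.toNat ≤ 122)
    (i : Nat) (hi : i < cs.length) :
    pvBodyA cs (pvTblFrom cs (i + 1)) (i : Int) = pvTblFrom cs i := by
  have hc : cs[i]'hi ∈ cs := List.getElem_mem hi
  obtain ⟨h71, h122⟩ := hpre _ hc
  unfold pvBodyA
  simp only [Int.toNat_natCast]
  rw [pv_tableCopy _ i (by simp [pvTblFrom]; omega) 26]
  rw [pv_tblFrom_row cs (i + 1) i (by omega), if_pos (by omega)]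
  rw [pv_tblFrom_row cs (i + 1) (i + 1) (by omega), if_neg (by omega)]
  rw [pv_rowCopy _ 26 _ (by simp) (by simp)]
  rw [List.take_of_length_le (by simp), List.drop_of_length_le (by simp), List.append_nil]
  rw [pv_getD_set_self _ _ _ _ (by simp [pvTblFrom]; omega)]
  rw [List.getD_eq_getElem cs ' ' hi]
  rw [pv_pySetD_eff _ _ _ h71 h122 (by simp)]
  rw [List.set_set, pv_rowA cs i hi, pv_tblSetA cs i hi]

theorem pv_foldA (cs : List Char) (hpre : ∀ c ∈ cs, 71 ≤ c.toNat ∧ c.toNat ≤ 122) :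
    ∀ (m : Nat), m ≤ cs.length →
    (PySem.List.pyRange ((m : Int) - 1) (-1) (-1)).foldl (pvBodyA cs) (pvTblFrom cs m)
      = pvTblFrom cs 0 := by
  intro m
  induction m with
  | zero =>
    intro _
    rw [PySem.List.pyRange_neg_one_eq_nil (by norm_num)]
    rfl
  | succ m ih =>
    intro hm
    have h1 : ((m + 1 : Nat) : Int) - 1 = (m : Int) := by push_cast; ring
    rw [h1, PySem.List.pyRange_neg_one_cons (by omega), List.foldl_cons]
    rw [pv_stepA cs hpre m (by omega)]
    exact ih (by omega)

theorem pv_eqA (s : String) (hpre : Pre_calc_next s) : calc_next s = pvTbl s.toList := by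
  have hpre' : ∀ c ∈ s.toList, 71 ≤ c.toNat ∧ c.toNat ≤ 122 := by
    intro c hc
    exact_mod_cast by simpa using (List.all_eq_true.mp hpre c hc)
  have hrfl : calc_next s
      = (PySem.List.pyRange ((s.toList.length : Int) - 1) (-1) (-1)).foldl
          (pvBodyA s.toList)
          (List.replicate (s.toList.length + 1) (List.replicate 26 (s.toList.length : Int))) :=
    rfl
  rw [hrfl]
  generalize s.toList = cs at hpre' ⊢
  have hinit : List.replicate (cs.length + 1) (List.replicate 26 (cs.length : Int))
      = pvTblFrom cs cs.length := by
    apply List.ext_getElem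
    · simp [pvTblFrom]
    · intro k hk hk'
      have hk2 : k < cs.length + 1 := by simpa using hk
      simp only [List.getElem_replicate, pvTblFrom, List.getElem_map, List.getElem_range]
      by_cases h : k < cs.length
      · rw [if_pos h]
      · have hkl : k = cs.length := by omega
        subst hkl
        rw [if_neg (by omega)]
        apply List.ext_getElem
        · simp
        · intro j hj hj'
          simp only [List.getElem_replicate, List.getElem_map, pvN_len]
  rw [hinit, pv_foldA cs hpre' cs.length le_rfl]
  unfold pvTblFrom pvTbl
  simp

-- ===== B side =====

-- pvN characterisations used by the run-expansion argument
theorem pvN_none_aux (cs : List Char) (j : Nat) :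
    ∀ (d i : Nat), d = cs.length - i → i ≤ cs.length →
    (∀ k, i ≤ k → k < cs.length → pvEff (cs.getD k ' ') ≠ j) → pvN cs j i = cs.length := by
  intro d
  induction d with
  | zero =>
    intro i hd hi _
    have : i = cs.length := by omega
    subst this
    exact pvN_len cs j
  | succ d ih =>
    intro i hd hi h
    have hlt : i < cs.length := by omega
    rw [pvN_step cs j i hlt, if_neg ?_]
    · exact ih (i + 1) (by omega) (by omega) (fun k hk1 hk2 => h k (by omega) hk2)
    · rw [← List.getD_eq_getElem cs ' ' hlt]
      exact h i le_rfl hlt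

theorem pvN_none (cs : List Char) (j i : Nat) (hi : i ≤ cs.length)
    (h : ∀ k, i ≤ k → k < cs.length → pvEff (cs.getD k ' ') ≠ j) :
    pvN cs j i = cs.length :=
  pvN_none_aux cs j (cs.length - i) i rfl hi h

theorem pvN_const_aux (cs : List Char) (j q : Nat) (hq : q < cs.length)
    (hmatch : pvEff (cs.getD q ' ') = j) :
    ∀ (d i : Nat), d = q - i → i ≤ q →
    (∀ k, i ≤ k → k < q → pvEff (cs.getD k ' ') ≠ j) → pvN cs j i = (q : Int) := by
  intro d
  induction d with
  | zero =>
    intro i hd hi _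
    have : i = q := by omega
    subst this
    rw [pvN_step cs j i (by omega), if_pos]
    rw [← List.getD_eq_getElem cs ' ' (by omega)]
    exact hmatch
  | succ d ih =>
    intro i hd hi h
    have hlt : i < q := by omega
    rw [pvN_step cs j i (by omega), if_neg ?_]
    · exact ih (i + 1) (by omega) (by omega) (fun k hk1 hk2 => h k (by omega) hk2)
    · rw [← List.getD_eq_getElem cs ' ' (by omega)]
      exact h i le_rfl hlt

theorem pvN_const (cs : List Char) (j q i : Nat) (hq : q < cs.length) (hi : i ≤ q)
    (hmatch : pvEff (cs.getD q ' ') = j)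
    (h : ∀ k, i ≤ k → k < q → pvEff (cs.getD k ' ') ≠ j) : pvN cs j i = (q : Int) :=
  pvN_const_aux cs j q hq hmatch (q - i) i rfl hi h

-- occurrence list of letter j among the first m positions, as Ints
def pvOccF (cs : List Char) (j m : Nat) : List Int :=
  ((List.range m).filter (fun i => decide (pvEff (cs.getD i ' ') = j))).map
    (fun i => ((i : Nat) : Int))

-- the bucketing pass builds exactly the 26 occurrence lists
theorem pv_occFold (cs : List Char) (hpre : ∀ c ∈ cs, 71 ≤ c.toNat ∧ c.toNat ≤ 122) :
    ∀ (m : Nat), m ≤ cs.length →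
    (PySem.List.enumerate (cs.take m)).foldl pvOccStep (List.replicate 26 ([] : List Int))
      = (List.range 26).map (fun j => pvOccF cs j m) := by
  intro m
  induction m with
  | zero =>
    intro _
    simp only [List.take_zero, PySem.List.enumerate_nil, List.foldl_nil]
    apply List.ext_getElem (by simp)
    intro k hk hk'
    simp [pvOccF]
  | succ m ih =>
    intro hm
    have hjm : m < cs.length := by omega
    rw [List.take_add_one, List.getElem?_eq_getElem hjm, Option.toList_some,
      PySem.List.enumerate_append, List.foldl_append, ih (by omega)]
    have hlen : ((cs.take m).length : Int) = (m : Int) := by simp; omega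
    rw [hlen, PySem.List.enumerate_cons, PySem.List.enumerate_nil]
    simp only [List.foldl_cons, List.foldl_nil, zero_add]
    have hc := hpre (cs[m]'hjm) (List.getElem_mem hjm)
    have hE := pv_eff_lt (cs[m]'hjm) hc.2
    show pvOccStep ((List.range 26).map (fun j => pvOccF cs j m)) ((m : Int), cs[m]'hjm)
        = (List.range 26).map (fun j => pvOccF cs j (m + 1))
    unfold pvOccStep
    rw [pv_pySetD_eff _ _ _ hc.1 hc.2 (by simp), pv_pyGetD_eff _ _ _ hc.1 hc.2 (by simp)]
    rw [List.getD_eq_getElem _ _ (by simpa using hE)]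
    simp only [List.getElem_map, List.getElem_range]
    apply List.ext_getElem (by simp)
    intro k hk hk'
    have hk26 : k < 26 := by simpa using hk
    simp only [List.getElem_set, List.getElem_map, List.getElem_range]
    have hsucc : pvOccF cs k (m + 1)
        = pvOccF cs k m ++ (if pvEff (cs.getD m ' ') = k then [(m : Int)] else []) := by
      unfold pvOccF
      rw [List.range_succ, List.filter_append, List.map_append]
      congr 1
      simp only [List.filter_cons, List.filter_nil]
      by_cases h : pvEff (cs.getD m ' ') = k
      · rw [if_pos (by simpa using h), if_pos h]; rfl
      · rw [if_neg (by simpa using h), if_neg h]; rfl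
    rw [hsucc, List.getD_eq_getElem cs ' ' hjm]
    by_cases h : pvEff (cs[m]'hjm) = k
    · rw [if_pos h, if_pos h, h]
    · rw [if_neg h, if_neg h, List.append_nil]

-- run-length expansion of a sorted occurrence list yields the pvN column
theorem pv_colBuild (cs : List Char) (j : Nat) :
    ∀ (qs : List Nat) (a : Nat) (acc : List Int), a ≤ cs.length →
    qs.Pairwise (· < ·) →
    (∀ q ∈ qs, a ≤ q ∧ q < cs.length) →
    (∀ i, a ≤ i → i < cs.length → (pvEff (cs.getD i ' ') = j ↔ i ∈ qs)) →
    (let st := (qs.map (fun q => ((q : Nat) : Int))).foldl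
        (fun (q : List Int × Int) p => (q.1 ++ List.replicate (p - q.2).toNat p, p))
        (acc, ((a : Nat) : Int) - 1);
     st.1 ++ List.replicate (((cs.length : Int)) - st.2).toNat (cs.length : Int))
    = acc ++ (List.range' a (cs.length + 1 - a)).map (fun i => pvN cs j i) := by
  intro qs
  induction qs with
  | nil =>
    intro a acc ha _ _ hch
    simp only [List.map_nil, List.foldl_nil]
    have h1 : (((cs.length : Int)) - (((a : Nat) : Int) - 1)).toNat = cs.length + 1 - a := by
      omega
    rw [h1]
    congr 1
    apply List.ext_getElem (by simp)
    intro k hk hk'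
    have hk2 : k < cs.length + 1 - a := by simpa using hk
    simp only [List.getElem_replicate, List.getElem_map, List.getElem_range']
    rw [pvN_none cs j (a + 1 * k) (by omega)]
    intro t ht1 ht2 hcontra
    exact absurd ((hch t (by omega) ht2).1 hcontra) (List.not_mem_nil)
  | cons q qs' ih =>
    intro a acc ha hpw hbd hch
    obtain ⟨haq, hqn⟩ := hbd q List.mem_cons_self
    have hmatch : pvEff (cs.getD q ' ') = j := by
      exact (hch q haq hqn).2 List.mem_cons_self
    have hqall : ∀ x ∈ qs', q < x := (List.pairwise_cons.mp hpw).1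
    simp only [List.map_cons, List.foldl_cons]
    have h1 : (((q : Nat) : Int) - (((a : Nat) : Int) - 1)).toNat = q + 1 - a := by omega
    rw [h1]
    have h2 : ((q : Nat) : Int) = (((q + 1 : Nat)) : Int) - 1 := by push_cast; ring
    have ihh := ih (q + 1) (acc ++ List.replicate (q + 1 - a) ((q : Nat) : Int))
      (by omega) (List.pairwise_cons.mp hpw).2
      (fun x hx => ⟨by have := hqall x hx; omega, (hbd x (List.mem_cons_of_mem q hx)).2⟩)
      (fun i hi1 hi2 => by
        rw [hch i (by omega) hi2]
        constructor
        · intro hmem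
          rcases List.mem_cons.mp hmem with h | h
          · omega
          · exact h
        · intro h; exact List.mem_cons_of_mem q h)
    rw [← h2] at ihh
    rw [ihh]
    have hrep : List.replicate (q + 1 - a) ((q : Nat) : Int)
        = (List.range' a (q + 1 - a)).map (fun i => pvN cs j i) := by
      apply List.ext_getElem (by simp)
      intro k hk hk'
      have hk2 : k < q + 1 - a := by simpa using hk
      simp only [List.getElem_replicate, List.getElem_map, List.getElem_range']
      rw [pvN_const cs j q (a + 1 * k) hqn (by omega) hmatch]
      intro t ht1 ht2 hcontra
      rcases List.mem_cons.mp ((hch t (by omega) (by omega)).1 hcontra) with h | h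
      · omega
      · have := hqall t h; omega
    have hsplit : List.range' a (cs.length + 1 - a)
        = List.range' a (q + 1 - a) ++ List.range' (q + 1) (cs.length - q) := by
      have h3 := @List.range'_append a (q + 1 - a) (cs.length - q) 1
      rw [show a + 1 * (q + 1 - a) = q + 1 by omega,
        show (q + 1 - a) + (cs.length - q) = cs.length + 1 - a by omega] at h3
      exact h3.symm
    rw [hsplit, List.map_append, ← List.append_assoc, hrep,
      show cs.length + 1 - (q + 1) = cs.length - q by omega]

-- each column of B equals the corresponding pvN column
theorem pv_colOf (cs : List Char) (j : Nat) :
    pvColOf cs.length (pvOccF cs j cs.length)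
      = (List.range (cs.length + 1)).map (fun i => pvN cs j i) := by
  have h := pv_colBuild cs j
    ((List.range cs.length).filter (fun i => decide (pvEff (cs.getD i ' ') = j))) 0 []
    (by omega)
    (List.Pairwise.filter _ List.pairwise_lt_range)
    (fun q hq => ⟨by omega, by
      have := List.mem_range.mp (List.mem_of_mem_filter hq); exact this⟩)
    (fun i _ hi2 => by
      constructor
      · intro hm
        exact List.mem_filter.mpr ⟨List.mem_range.mpr hi2, by simpa using hm⟩
      · intro hm
        simpa using (List.mem_filter.mp hm).2)
  have h0 : (((0 : Nat) : Int) - 1) = (-1 : Int) := by norm_num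
  rw [h0] at h
  unfold pvColOf pvOccF
  dsimp only
  dsimp only at h
  rw [h, List.nil_append, List.range_eq_range', Nat.sub_zero]

-- zip(*cols) of K columns of equal length m is the transpose
theorem pv_zipStar_map (K : Nat) :
    ∀ (m : Nat) (g : Nat → Nat → Int),
    pvZipStar m ((List.range K).map (fun j => (List.range m).map (fun i => g j i)))
      = (List.range m).map (fun i => (List.range K).map (fun j => g j i)) := by
  intro m
  induction m with
  | zero => intro g; rfl
  | succ m ih =>
    intro g
    rw [List.range_succ_eq_map]
    simp only [List.map_cons, List.map_map, pvZipStar]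
    rw [if_pos (by simp)]
    refine congrArg₂ List.cons ?_ ?_
    · simp [Function.comp_def]
    · exact ih (fun j i => g j (i + 1))

theorem pv_eqB (s : String) (hpre : Pre_calc_next s) : calc_next_alt s = pvTbl s.toList := by
  have hpre' : ∀ c ∈ s.toList, 71 ≤ c.toNat ∧ c.toNat ≤ 122 := by
    intro c hc
    exact_mod_cast by simpa using (List.all_eq_true.mp hpre c hc)
  have hrfl : calc_next_alt s
      = (let occ := (PySem.List.enumerate s.toList).foldl pvOccStep
            (List.replicate 26 ([] : List Int));
         let cols := occ.map (pvColOf s.toList.length);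
         pvZipStar ((cols.headD []).length) cols) := rfl
  rw [hrfl]
  generalize s.toList = cs at hpre' ⊢
  have hocc := pv_occFold cs hpre' cs.length le_rfl
  rw [List.take_length] at hocc
  simp only [hocc, List.map_map]
  have hcols : ((List.range 26).map ((pvColOf cs.length) ∘ (fun j => pvOccF cs j cs.length)))
      = (List.range 26).map (fun j => (List.range (cs.length + 1)).map (fun i => pvN cs j i)) :=
    List.map_congr_left (fun j _ => pv_colOf cs j)
  rw [hcols]
  have h26 : List.range 26 = 0 :: List.map Nat.succ (List.range 25) := List.range_succ_eq_map
  have hhead : ((((List.range 26).map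
      (fun j => (List.range (cs.length + 1)).map (fun i => pvN cs j i))).headD []).length)
      = cs.length + 1 := by
    rw [h26]; simp
  rw [hhead, pv_zipStar_map 26 (cs.length + 1) (fun j i => pvN cs j i)]
  rfl

-- ===== VERDICT (by name: the statement is the Claim_ definition above) =====
theorem calc_next_spec : Claim_equal_calc_next := by
  intro s _ hpre
  unfold Spec_calc_next
  rw [pv_eqA s hpre, pv_eqB s hpre]
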